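-- pv_equiv track=rewrite | github.com/EmboMaster/EmboMatrix | src/scene_level/distributeagent.py | check_floors_in_single_room
-- ===== SOURCE A (Python) =====
-- def check_floors_in_single_room(objects_list, room_data):
--     """
--     检查 list 中的 floors 是否仅出现在 dict 中的某一个房间中。
--
--     Args:
--         objects_list (list): 包含 floor 信息的列表。
--         room_data (dict): 包含房间信息的字典。
--
--     Returns:
--         dict: 每个 floor 所在房间的映射。
--         list: 同时出现在多个房间的 floors。
--     """
--     # 提取所有 floor 的标识符
--     floor_set = set()
--     for obj in objects_list:
--         if "floor" in obj:
--             # 提取出类似 floor.n.01_1 的信息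
--             floor_entries = [item for item in obj.split() if item.startswith("floor")]
--             floor_set.update(floor_entries)
--
--     # 创建一个映射来跟踪每个 floor 出现的房间
--     floor_room_map = {}
--
--     for room, data in room_data.items():
--         for tuple in data['tuples']:
--             obj = tuple[0]
--             if obj in floor_set:
--                 if obj not in floor_room_map:
--                     floor_room_map[obj] = set()
--                 floor_room_map[obj].add(room)
--
--     # 找出出现在多个房间的 floors
--     conflicting_floors = [floor for floor, rooms in floor_room_map.items() if len(rooms) > 1]
--
--     return floor_room_map, conflicting_floors
-- ===== SOURCE B (Python) =====
-- def check_floors_in_single_room(objects_list, room_data):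
--     # B: group-by-gather decomposition -- flatten room_data into (object, room) pairs,
--     # list the floor keys in first-occurrence order, then gather each key's room set
--     # by a direct scan of the pairs (no incremental dict-of-sets accumulation at all).
--     floor_set = set()
--     for obj in objects_list:
--         if "floor" in obj:
--             floor_entries = [item for item in obj.split() if item.startswith("floor")]
--             floor_set.update(floor_entries)
--
--     pairs = [(t[0], room) for room, data in room_data.items() for t in data['tuples']]
--
--     keys = []
--     for o, _ in pairs:
--         if o in floor_set and o not in keys:
--             keys.append(o)
--
--     floor_room_map = {k: {r for o, r in pairs if o == k} for k in keys}
--     conflicting_floors = [k for k in keys if len(floor_room_map[k]) > 1]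
--     return floor_room_map, conflicting_floors
-- ===== Notes on version B (the rewrite author's own statement) =====
-- stated objective: alternative
-- what changed: A accumulates a dict of room-sets incrementally while scanning room_data; B instead flattens room_data into (object, room) pairs, lists the floor keys in first-occurrence order, and gathers each key's room set by a direct per-key scan of the pairs (group-by via repeated selection, no incremental dict-of-sets).
import Mathlib
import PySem

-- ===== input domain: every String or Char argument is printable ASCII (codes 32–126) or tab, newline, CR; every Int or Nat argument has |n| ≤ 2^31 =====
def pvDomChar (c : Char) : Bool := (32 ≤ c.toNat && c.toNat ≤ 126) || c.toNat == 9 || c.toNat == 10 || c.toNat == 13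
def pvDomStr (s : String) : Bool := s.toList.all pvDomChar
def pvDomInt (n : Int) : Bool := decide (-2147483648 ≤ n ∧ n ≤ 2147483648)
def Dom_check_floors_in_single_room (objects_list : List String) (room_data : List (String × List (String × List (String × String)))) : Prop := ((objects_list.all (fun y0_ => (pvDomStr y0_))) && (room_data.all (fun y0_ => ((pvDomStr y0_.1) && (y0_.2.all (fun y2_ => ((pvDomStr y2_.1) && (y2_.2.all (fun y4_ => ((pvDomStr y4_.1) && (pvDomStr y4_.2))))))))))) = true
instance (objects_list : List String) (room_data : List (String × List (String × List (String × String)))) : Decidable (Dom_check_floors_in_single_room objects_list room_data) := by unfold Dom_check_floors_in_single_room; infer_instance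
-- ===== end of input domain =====

-- B replaces A's incremental dict-of-sets accumulation by a group-by-gather decomposition:
-- flatten to (object, room) pairs, list floor keys in first-occurrence order, gather each
-- key's rooms by a direct scan of the pairs; objective: alternative, not faster.

-- ===== PORT A =====
-- phase 1 (identical line-for-line in A and B): collect floor identifiers from objects_list
def pvFloorSet (objects_list : List String) : PySem.Set String :=
  objects_list.foldl (fun fs obj =>
    if PySem.Str.isIn "floor" obj = true then
      PySem.Set.update fs ((PySem.Str.split₀ obj).filter (fun item => PySem.Str.startswith item "floor"))
    else fs) PySem.Set.empty

def check_floors_in_single_room (objects_list : List String) (room_data : List (String × List (String × List (String × String)))) : (List (String × List String)) × List String :=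
  let floor_set := pvFloorSet objects_list
  let floor_room_map : PySem.Dict String (PySem.Set String) :=
    room_data.foldl (fun m rd =>
      -- data['tuples'] : KeyError when absent — excluded by Pre_
      (((PySem.Dict.mk rd.2).get? "tuples").getD []).foldl (fun m t =>
        if PySem.Set.contains floor_set t.1 = true then
          let m' := if m.contains t.1 = true then m else m.insert t.1 PySem.Set.empty
          m'.modify t.1 PySem.Set.empty (fun s => PySem.Set.add s rd.1)
        else m) m) PySem.Dict.empty
  (floor_room_map.items,
   (floor_room_map.items.filter (fun p => decide (1 < PySem.Set.len p.2))).map (fun p => p.1))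

-- ===== PORT B =====
def check_floors_in_single_room_alt (objects_list : List String) (room_data : List (String × List (String × List (String × String)))) : (List (String × List String)) × List String :=
  let floor_set := pvFloorSet objects_list
  -- pairs = [(t[0], room) for room, data in room_data.items() for t in data['tuples']]
  let pairs : List (String × String) :=
    room_data.flatMap (fun rd => (((PySem.Dict.mk rd.2).get? "tuples").getD []).map (fun t => (t.1, rd.1)))
  -- keys: floor objects in first-occurrence order
  let keys : List String :=
    pairs.foldl (fun ks p =>
      if (PySem.Set.contains floor_set p.1 && !(ks.contains p.1)) = true then ks ++ [p.1] else ks) []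
  -- {k: {r for o, r in pairs if o == k} for k in keys}
  let floor_room_map : PySem.Dict String (PySem.Set String) :=
    PySem.Dict.mk (keys.map (fun k => (k, PySem.Set.ofList ((pairs.filter (fun q => q.1 == k)).map (fun q => q.2)))))
  (floor_room_map.items,
   keys.filter (fun k => decide (1 < PySem.Set.len (floor_room_map.getD k PySem.Set.empty))))

-- ===== PRECONDITION & SPEC =====
-- Pre_ excludes exactly the inputs where some room's data lacks the key "tuples": Python A raises KeyError there.
def Pre_check_floors_in_single_room (objects_list : List String) (room_data : List (String × List (String × List (String × String)))) : Prop :=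
  ∀ p ∈ room_data, (PySem.Dict.mk p.2).contains "tuples" = true
instance (objects_list : List String) (room_data : List (String × List (String × List (String × String)))) : Decidable (Pre_check_floors_in_single_room objects_list room_data) := by unfold Pre_check_floors_in_single_room; infer_instance

def pvWitness_check_floors_in_single_room : List String × (List (String × List (String × List (String × String)))) :=
  (["floor.n.01_1 chair"], [("kitchen", [("tuples", [("floor.n.01_1", "on")])])])

def Spec_check_floors_in_single_room (objects_list : List String) (room_data : List (String × List (String × List (String × String)))) (out : (List (String × List String)) × List String) : Prop := out = check_floors_in_single_room_alt objects_list room_data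
instance (objects_list : List String) (room_data : List (String × List (String × List (String × String)))) (out : (List (String × List String)) × List String) : Decidable (Spec_check_floors_in_single_room objects_list room_data out) := by unfold Spec_check_floors_in_single_room; infer_instance

-- ===== CLAIM (what is proved, stated in full; the proofs are below) =====
def Claim_equal_check_floors_in_single_room : Prop := ∀ (objects_list : List String) (room_data : List (String × List (String × List (String × String)))), Dom_check_floors_in_single_room objects_list room_data → Pre_check_floors_in_single_room objects_list room_data → Spec_check_floors_in_single_room objects_list room_data (check_floors_in_single_room objects_list room_data)

-- ===== LEMMAS AND PROOFS =====

-- the common one-pair step of A's accumulation, once its ensure-then-add is a single modify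
def pvStep (fs : PySem.Set String) (m : PySem.Dict String (PySem.Set String)) (p : String × String) : PySem.Dict String (PySem.Set String) :=
  if PySem.Set.contains fs p.1 = true then m.modify p.1 PySem.Set.empty (fun s => PySem.Set.add s p.2) else m

-- B's key-collecting loop, with a general accumulator
def pvKeysF (fs : PySem.Set String) (ks : List String) (ps : List (String × String)) : List String :=
  ps.foldl (fun ks p => if (PySem.Set.contains fs p.1 && !(ks.contains p.1)) = true then ks ++ [p.1] else ks) ks

-- B's gathered value for one key
def pvVal (k : String) (ps : List (String × String)) : PySem.Set String :=
  PySem.Set.ofList ((ps.filter (fun q => q.1 == k)).map (fun q => q.2))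

theorem pv_guard_iff (fs : PySem.Set String) (ks : List String) (x : String) :
    ((PySem.Set.contains fs x && !(ks.contains x)) = true) ↔ (x ∈ fs ∧ x ∉ ks) := by
  simp

theorem pv_modify_eq_insert (d : PySem.Dict String (PySem.Set String)) (k : String)
    (d0 : PySem.Set String) (f : PySem.Set String → PySem.Set String) :
    d.modify k d0 f = d.insert k (f (d.getD k d0)) := rfl

-- A's ensure-then-add step is a single modify
theorem pv_stepA_eq_modify (m : PySem.Dict String (PySem.Set String)) (o r : String) :
    ((if m.contains o = true then m else m.insert o PySem.Set.empty).modify o PySem.Set.empty (fun s => PySem.Set.add s r))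
      = m.modify o PySem.Set.empty (fun s => PySem.Set.add s r) := by
  by_cases hc : m.contains o = true
  · rw [if_pos hc]
  · rw [if_neg hc]
    rw [pv_modify_eq_insert, pv_modify_eq_insert]
    rw [PySem.Dict.getD_insert_self, PySem.Dict.insert_insert_self,
      PySem.Dict.getD_of_not_contains m PySem.Set.empty (by simpa using hc)]

theorem pv_mem_keysF (fs : PySem.Set String) (ps : List (String × String)) (ks : List String) (k : String) :
    k ∈ pvKeysF fs ks ps ↔ k ∈ ks ∨ (k ∈ fs ∧ k ∈ ps.map Prod.fst) := by
  induction ps generalizing ks with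
  | nil => simp [pvKeysF]
  | cons p ps ih =>
    unfold pvKeysF
    rw [List.foldl_cons]
    by_cases hc : p.1 ∈ fs ∧ p.1 ∉ ks
    · rw [if_pos ((pv_guard_iff fs ks p.1).mpr hc)]
      rw [show (ps.foldl _ (ks ++ [p.1])) = pvKeysF fs (ks ++ [p.1]) ps from rfl, ih]
      constructor
      · rintro (hk | ⟨h1, h2⟩)
        · rcases List.mem_append.mp hk with h | h
          · exact Or.inl h
          · have hkp : k = p.1 := by simpa using h
            exact Or.inr ⟨hkp ▸ hc.1, by simp [hkp]⟩
        · exact Or.inr ⟨h1, by simp [h2]⟩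
      · rintro (hk | ⟨h1, h2⟩)
        · exact Or.inl (List.mem_append.mpr (Or.inl hk))
        · rcases (by simpa using h2 : k = p.1 ∨ k ∈ ps.map Prod.fst) with h | h
          · exact Or.inl (List.mem_append.mpr (Or.inr (by simp [h])))
          · exact Or.inr ⟨h1, h⟩
    · rw [if_neg (fun hg => hc ((pv_guard_iff fs ks p.1).mp hg))]
      rw [show (ps.foldl _ ks) = pvKeysF fs ks ps from rfl, ih]
      constructor
      · rintro (hk | ⟨h1, h2⟩)
        · exact Or.inl hk
        · exact Or.inr ⟨h1, by simp [h2]⟩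
      · rintro (hk | ⟨h1, h2⟩)
        · exact Or.inl hk
        · rcases (by simpa using h2 : k = p.1 ∨ k ∈ ps.map Prod.fst) with h | h
          · -- k = p.1 with the guard false: either fs misses p.1 (contradiction) or p.1 ∈ ks
            by_cases hmem : k ∈ ks
            · exact Or.inl hmem
            · exact absurd ⟨h ▸ h1, h ▸ hmem⟩ hc
          · exact Or.inr ⟨h1, h⟩

theorem pv_nodup_keysF (fs : PySem.Set String) (ps : List (String × String)) (ks : List String) (h : ks.Nodup) :
    (pvKeysF fs ks ps).Nodup := by
  induction ps generalizing ks with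
  | nil => exact h
  | cons p ps ih =>
    unfold pvKeysF
    rw [List.foldl_cons]
    by_cases hc : p.1 ∈ fs ∧ p.1 ∉ ks
    · rw [if_pos ((pv_guard_iff fs ks p.1).mpr hc)]
      refine ih _ ?_
      rw [List.nodup_append]
      exact ⟨h, List.nodup_singleton _, by simpa [List.disjoint_singleton] using fun a ha (h' : a = p.1) => hc.2 (h' ▸ ha)⟩
    · rw [if_neg (fun hg => hc ((pv_guard_iff fs ks p.1).mp hg))]
      exact ih _ h

theorem pv_keysF_append (fs : PySem.Set String) (ps : List (String × String)) (p : String × String) :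
    pvKeysF fs [] (ps ++ [p])
      = if (PySem.Set.contains fs p.1 && !((pvKeysF fs [] ps).contains p.1)) = true
          then pvKeysF fs [] ps ++ [p.1] else pvKeysF fs [] ps := by
  unfold pvKeysF
  rw [List.foldl_append, List.foldl_cons, List.foldl_nil]

-- Python's set() of a list with one more element is one Set.add
theorem pv_ofList_append_singleton (l : List String) (r : String) :
    PySem.Set.ofList (l ++ [r]) = PySem.Set.add (PySem.Set.ofList l) r := by
  simp [PySem.Set.ofList_eq_foldl, List.foldl_append]

-- a pair whose key is not k leaves the gathered value unchanged
theorem pv_val_append_ne (k : String) (ps : List (String × String)) (p : String × String)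
    (h : k ≠ p.1) : pvVal k (ps ++ [p]) = pvVal k ps := by
  unfold pvVal
  rw [List.filter_append]
  simp only [List.filter_cons, List.filter_nil]
  rw [if_neg (by simp; exact fun h' => (h h'.symm).elim)]
  simp

-- a pair at key k extends the gathered value by one Set.add
theorem pv_val_append_eq (ps : List (String × String)) (p : String × String) :
    pvVal p.1 (ps ++ [p]) = PySem.Set.add (pvVal p.1 ps) p.2 := by
  unfold pvVal
  rw [List.filter_append, List.map_append]
  simp only [List.filter_cons, List.filter_nil]
  rw [if_pos (by simp)]
  simp [pv_ofList_append_singleton]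

-- MAIN: A's one-pass accumulation over the pairs equals B's keys-then-gather construction
theorem pv_items (fs : PySem.Set String) (ps : List (String × String)) :
    (ps.foldl (pvStep fs) PySem.Dict.empty).items
      = (pvKeysF fs [] ps).map (fun k => (k, pvVal k ps)) := by
  induction ps using List.reverseRecOn with
  | nil => rfl
  | append_singleton ps p ih =>
    set D := ps.foldl (pvStep fs) PySem.Dict.empty with hD
    have hkeys : D.keys = pvKeysF fs [] ps := by
      show D.items.map Prod.fst = _
      rw [ih, List.map_map]
      rw [show (Prod.fst ∘ fun k => (k, pvVal k ps)) = id from rfl, List.map_id]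
    have hnd : (pvKeysF fs [] ps).Nodup := pv_nodup_keysF fs ps [] List.nodup_nil
    rw [List.foldl_append, List.foldl_cons, List.foldl_nil, pv_keysF_append, ← hD]
    by_cases hfs : PySem.Set.contains fs p.1 = true
    · by_cases hin : p.1 ∈ pvKeysF fs [] ps
      · -- existing key: guard false, modify overwrites in place
        rw [if_neg (fun hg => ((pv_guard_iff fs _ p.1).mp hg).2 hin)]
        have hconD : D.contains p.1 = true :=
          (PySem.Dict.contains_iff_mem_keys _ _).mpr (hkeys ▸ hin)
        have hgetD : D.getD p.1 PySem.Set.empty = pvVal p.1 ps := by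
          apply PySem.Dict.getD_of_mem_items
          · rw [ih]; exact List.mem_map.mpr ⟨p.1, hin, rfl⟩
          · rw [hkeys]; exact hnd
        rw [show pvStep fs D p = D.insert p.1 (PySem.Set.add (pvVal p.1 ps) p.2) from by
          unfold pvStep; rw [if_pos hfs, pv_modify_eq_insert, hgetD]]
        rw [PySem.Dict.items_insert_of_contains _ _ hconD, ih, List.map_map]
        apply List.map_congr_left
        intro k hk
        by_cases hkp : k = p.1
        · subst hkp
          simp only [Function.comp]
          rw [if_pos (by simp)]
          rw [pv_val_append_eq ps p]
        · simp only [Function.comp]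
          rw [if_neg (by simp [hkp])]
          rw [pv_val_append_ne k ps p hkp]
      · -- fresh key: guard true, modify appends
        rw [if_pos ((pv_guard_iff fs _ p.1).mpr ⟨by simpa using hfs, hin⟩)]
        have hconD : D.contains p.1 = false := by
          rw [← Bool.not_eq_true]
          intro hcd
          exact hin (hkeys ▸ (PySem.Dict.contains_iff_mem_keys _ _).mp hcd)
        have hgetD : D.getD p.1 PySem.Set.empty = PySem.Set.empty :=
          PySem.Dict.getD_of_not_contains _ _ hconD
        rw [show pvStep fs D p = D.insert p.1 (PySem.Set.add PySem.Set.empty p.2) from by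
          unfold pvStep; rw [if_pos hfs, pv_modify_eq_insert, hgetD]]
        rw [PySem.Dict.items_insert_of_not_contains _ _ hconD, ih, List.map_append]
        have hps : ps.filter (fun q => q.1 == p.1) = [] := by
          rw [List.filter_eq_nil_iff]
          intro q hq hq1
          apply hin
          rw [pv_mem_keysF]
          refine Or.inr ⟨by simpa using hfs, ?_⟩
          have hq1' : q.1 = p.1 := by simpa using hq1
          exact hq1' ▸ List.mem_map.mpr ⟨q, hq, rfl⟩
        congr 1
        · -- old keys: the new pair has a key none of them.
          apply List.map_congr_left
          intro k hk
          rw [pv_val_append_ne k ps p (fun h => hin (h ▸ hk))]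
        · -- the new key gathers exactly its one room so far
          have hv : pvVal p.1 (ps ++ [p]) = PySem.Set.add PySem.Set.empty p.2 := by
            unfold pvVal
            rw [List.filter_append, hps]
            simp only [List.nil_append, List.filter_cons, List.filter_nil]
            rw [if_pos (by simp)]
            rfl
          simp [hv]
    · -- non-floor object: both sides ignore the pair
      rw [if_neg (by simp; exact fun h => absurd (by simpa using h : PySem.Set.contains fs p.1 = true) hfs)]
      rw [show pvStep fs D p = D from by unfold pvStep; rw [if_neg hfs]]
      rw [ih]
      apply List.map_congr_left
      intro k hk
      have hkp : k ≠ p.1 := by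
        intro h
        rcases (pv_mem_keysF fs ps [] k).mp hk with h' | ⟨h1, _⟩
        · simp at h'
        · exact hfs (by simpa using h ▸ h1)
      rw [pv_val_append_ne k ps p hkp]

-- A's nested room/tuple loops are the single pass over the flattened pairs
theorem pv_A_eq_pairs (fs : PySem.Set String) (room_data : List (String × List (String × List (String × String)))) :
    room_data.foldl (fun m rd =>
        (((PySem.Dict.mk rd.2).get? "tuples").getD []).foldl (fun m t =>
          if PySem.Set.contains fs t.1 = true then
            let m' := if m.contains t.1 = true then m else m.insert t.1 PySem.Set.empty
            m'.modify t.1 PySem.Set.empty (fun s => PySem.Set.add s rd.1)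
          else m) m) PySem.Dict.empty
      = (room_data.flatMap (fun rd => (((PySem.Dict.mk rd.2).get? "tuples").getD []).map (fun t => (t.1, rd.1)))).foldl
          (pvStep fs) PySem.Dict.empty := by
  rw [List.foldl_flatMap]
  apply PySem.List.foldl_congr_mem
  intro m rd _
  rw [List.foldl_map]
  apply PySem.List.foldl_congr_mem
  intro m t _
  unfold pvStep
  by_cases hP : PySem.Set.contains fs t.1 = true
  · simp only [hP, if_true]
    exact pv_stepA_eq_modify m t.1 rd.1
  · rw [if_neg hP, if_neg hP]

-- ===== VERDICT (by name: the statement is the Claim_ definition above) =====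
theorem check_floors_in_single_room_spec : Claim_equal_check_floors_in_single_room := by
  intro objects_list room_data _ _
  unfold Spec_check_floors_in_single_room check_floors_in_single_room check_floors_in_single_room_alt
  simp only []
  set fs := pvFloorSet objects_list with hfs
  set pairs := room_data.flatMap (fun rd => (((PySem.Dict.mk rd.2).get? "tuples").getD []).map (fun t => (t.1, rd.1))) with hpairs
  have hA := pv_A_eq_pairs fs room_data
  rw [hA, pv_items fs pairs]
  set K := pvKeysF fs [] pairs with hK
  have hKdef : K = pairs.foldl (fun ks p =>
      if (PySem.Set.contains fs p.1 && !(ks.contains p.1)) = true then ks ++ [p.1] else ks) [] := rfl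
  rw [← hKdef]
  have hnd : K.Nodup := pv_nodup_keysF fs pairs [] List.nodup_nil
  refine Prod.ext ?_ ?_
  · rfl
  · -- conflicting floors: A filters the items, B filters the keys with a dict lookup
    show ((K.map (fun k => (k, pvVal k pairs))).filter (fun p => decide (1 < PySem.Set.len p.2))).map (fun p => p.1)
        = K.filter (fun k => decide (1 < PySem.Set.len ((PySem.Dict.mk (K.map (fun k => (k, PySem.Set.ofList ((pairs.filter (fun q => q.1 == k)).map (fun q => q.2)))))).getD k PySem.Set.empty)))
    rw [List.filter_map, List.map_map]
    have hfst : ((fun (p : String × PySem.Set String) => p.1) ∘ (fun k => (k, pvVal k pairs))) = fun (k : String) => k := rfl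
    rw [hfst]
    rw [show (List.map (fun (k : String) => k)
        (List.filter ((fun (p : String × PySem.Set String) => decide (1 < PySem.Set.len p.2)) ∘ fun k => (k, pvVal k pairs)) K))
      = List.filter ((fun (p : String × PySem.Set String) => decide (1 < PySem.Set.len p.2)) ∘ fun k => (k, pvVal k pairs)) K from
        List.map_id' _]
    apply List.filter_congr
    intro k hk
    have hdnd : ((PySem.Dict.mk (K.map (fun k => (k, PySem.Set.ofList ((pairs.filter (fun q => q.1 == k)).map (fun q => q.2))))) : PySem.Dict String (PySem.Set String))).keys.Nodup := by
      show ((K.map _).map Prod.fst).Nodup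
      rw [List.map_map]
      rw [show (Prod.fst ∘ fun k => (k, PySem.Set.ofList ((pairs.filter (fun q => q.1 == k)).map (fun q => q.2)))) = id from rfl, List.map_id]
      exact hnd
    have hget : (PySem.Dict.mk (K.map (fun k => (k, PySem.Set.ofList ((pairs.filter (fun q => q.1 == k)).map (fun q => q.2)))))).getD k PySem.Set.empty = pvVal k pairs := by
      apply PySem.Dict.getD_of_mem_items
      · exact List.mem_map.mpr ⟨k, hk, rfl⟩
      · exact hdnd
    rw [hget]
    rfl
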